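-- pv_equiv track=rewrite | github.com/God-Hand/Guvi-solutions | codekata/Player/set-10/100.py | bch
-- ===== SOURCE A (Python) =====
-- def bch(n):
--     if n==1 or n==0:
--         return n
--     s = 0
--     for i in range(4):
--         s += (2**i)*(n%10)
--         n = n//10
--     return s + 10*bch(n)
-- ===== SOURCE B (Python) =====
-- def bch(n):
--     result = 0
--     multiplier = 1
--     while n > 1:
--         s = sum((2 ** i) * ((n // 10 ** i) % 10) for i in range(4))
--         result += multiplier * s
--         multiplier *= 10
--         n //= 10000
--     if n == 1:
--         result += multiplier
--     return result
-- ===== Notes on version B (the rewrite author's own statement) =====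
-- stated objective: alternative
-- what changed: Replaces the recursion (digit-peeling loop plus recursive call on n//10000) by a single iterative while-loop carrying an accumulator and a power-of-10 multiplier, with the 4-digit block sum computed by a closed indexed sum instead of mutating n digit by digit.
import Mathlib
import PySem

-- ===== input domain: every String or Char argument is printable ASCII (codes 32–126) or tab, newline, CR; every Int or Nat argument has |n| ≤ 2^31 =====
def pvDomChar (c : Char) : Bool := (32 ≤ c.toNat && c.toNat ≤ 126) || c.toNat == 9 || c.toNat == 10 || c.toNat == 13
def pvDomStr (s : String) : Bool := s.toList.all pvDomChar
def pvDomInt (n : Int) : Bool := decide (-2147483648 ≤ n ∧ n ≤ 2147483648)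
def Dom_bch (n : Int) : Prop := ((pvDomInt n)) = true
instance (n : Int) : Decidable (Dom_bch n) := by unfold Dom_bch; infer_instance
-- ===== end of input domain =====

-- B replaces A's recursion by a single accumulator/multiplier while-loop with a
-- closed indexed block sum (objective: alternative decomposition, same cost).
-- On negative n Python A recurses forever (RecursionError); excluded by Pre_.

-- ===== PORT A =====
-- A: recursive; the inner for-loop over range(4) peels digits mutating (s, n).
-- Python A does not terminate for n < 0 (n//10000 stays negative), so the port
-- carries a fuel parameter (n.natAbs + 1 always suffices on Pre_).
def bchFuel : Nat → Int → Int
  | 0, _ => 0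
  | f + 1, n =>
    if n = 1 ∨ n = 0 then n
    else
      let p := (List.range 4).foldl
        (fun (st : Int × Int) (i : Nat) =>
          (st.1 + 2 ^ i * PySem.Int.mod st.2 10, PySem.Int.floordiv st.2 10))
        (0, n)
      p.1 + 10 * bchFuel f p.2

def bch (n : Int) : Int := bchFuel (n.natAbs + 1) n

-- ===== PORT B =====
-- B: while n > 1 loop; block sum as an indexed sum, n //= 10000 each round.
def bchAltLoop (n result multiplier : Int) : Int :=
  if h : 1 < n then
    let s := (List.range 4).foldl
      (fun acc (i : Nat) =>
        acc + 2 ^ i * PySem.Int.mod (PySem.Int.floordiv n (10 ^ i)) 10) 0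
    bchAltLoop (PySem.Int.floordiv n 10000) (result + multiplier * s) (multiplier * 10)
  else if n = 1 then result + multiplier else result
termination_by n.toNat
decreasing_by
  rw [PySem.Int.floordiv_eq_ediv_of_pos (by norm_num)]
  omega

def bch_alt (n : Int) : Int := bchAltLoop n 0 1

-- ===== PRECONDITION & SPEC =====
-- Pre_ excludes exactly n < 0, where Python A recurses without bound and raises RecursionError.
def Pre_bch (n : Int) : Prop := 0 ≤ n
instance (n : Int) : Decidable (Pre_bch n) := by unfold Pre_bch; infer_instance
def pvWitness_bch : Int := (12345)

def Spec_bch (n : Int) (out : Int) : Prop := out = bch_alt n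
instance (n : Int) (out : Int) : Decidable (Spec_bch n out) := by unfold Spec_bch; infer_instance

-- ===== CLAIM (what is proved, stated in full; the proofs are below) =====
def Claim_equal_bch : Prop := ∀ (n : Int), Dom_bch n → Pre_bch n → Spec_bch n (bch n)

-- ===== LEMMAS AND PROOFS =====
theorem bch_key (f : Nat) : ∀ (n r m : Int), 0 ≤ n → n.natAbs < f →
    bchAltLoop n r m = r + m * bchFuel f n := by
  induction f with
  | zero => intro n r m _ h; omega
  | succ f ih =>
    intro n r m hn hf
    by_cases h2 : n < 2
    · interval_cases n <;> rw [bchAltLoop] <;> simp [bchFuel]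
    · rw [bchAltLoop, dif_pos (by omega)]
      rw [bchFuel, if_neg (by omega)]
      have hd : ∀ (a : Int) (b : Nat), PySem.Int.floordiv a ((10:Int) ^ b) = a / 10 ^ b := by
        intro a b
        exact PySem.Int.floordiv_eq_ediv_of_pos (by positivity)
      have hd1 : ∀ (a : Int), PySem.Int.floordiv a 10 = a / 10 := by
        intro a; exact PySem.Int.floordiv_eq_ediv_of_pos (by norm_num)
      have hm : ∀ (a : Int), PySem.Int.mod a 10 = a % 10 := by
        intro a; exact PySem.Int.mod_eq_emod_of_pos (by norm_num)
      have hd4 : PySem.Int.floordiv n 10000 = n / 10000 :=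
        PySem.Int.floordiv_eq_ediv_of_pos (by norm_num)
      rw [ih (PySem.Int.floordiv n 10000) _ _ (by rw [hd4]; omega)
            (by rw [hd4]; omega)]
      simp only [List.range_succ, List.range_zero, List.foldl_append, List.foldl_cons,
        List.foldl_nil, hd, hd1, hm, hd4]
      norm_num
      have e1 : n / 10 / 10 = n / 100 := by omega
      have e2 : n / 100 / 10 = n / 1000 := by omega
      have e3 : n / 1000 / 10 = n / 10000 := by omega
      rw [e1, e2, e3]
      ring

-- ===== VERDICT (by name: the statement is the Claim_ definition above) =====
theorem bch_spec : Claim_equal_bch := by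
  intro n _ hn
  unfold Spec_bch bch bch_alt
  rw [bch_key (n.natAbs + 1) n 0 1 hn (by omega)]
  ring
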